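-- pv_equiv track=rewrite | github.com/arsaikia/LeetCode | 1802-number-of-students-unable-to-eat-lunch/number-of-students-unable-to-eat-lunch.py | countStudents
-- ===== SOURCE A (Python) =====
-- from typing import List
--
-- from collections import deque
--
-- def countStudents(students: List[int], sandwich: List[int]) -> int:
--     student, sandwiches = deque(students), deque(sandwich)
--     while sandwiches and sandwiches[0] in student:
--         if student[0] == sandwiches[0]:
--             student.popleft()
--             sandwiches.popleft()
--         else:
--             current = student.popleft()
--             student.append(current)
--
--     return len(student)
-- ===== SOURCE B (Python) =====
-- from typing import List
-- from collections import Counter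
--
-- def countStudents(students: List[int], sandwich: List[int]) -> int:
--     counts = Counter(students)
--     remaining = len(students)
--     for s in sandwich:
--         if counts[s] == 0:
--             break
--         counts[s] -= 1
--         remaining -= 1
--     return remaining
-- ===== Notes on version B (the rewrite author's own statement) =====
-- stated objective: alternative
-- what changed: A simulates the queue, rotating students to the back until the front student matches each sandwich; B never simulates the queue: it tallies preferences once with a Counter, consumes sandwiches in order decrementing the tally, and stops at the first sandwich nobody left wants.
import Mathlib
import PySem

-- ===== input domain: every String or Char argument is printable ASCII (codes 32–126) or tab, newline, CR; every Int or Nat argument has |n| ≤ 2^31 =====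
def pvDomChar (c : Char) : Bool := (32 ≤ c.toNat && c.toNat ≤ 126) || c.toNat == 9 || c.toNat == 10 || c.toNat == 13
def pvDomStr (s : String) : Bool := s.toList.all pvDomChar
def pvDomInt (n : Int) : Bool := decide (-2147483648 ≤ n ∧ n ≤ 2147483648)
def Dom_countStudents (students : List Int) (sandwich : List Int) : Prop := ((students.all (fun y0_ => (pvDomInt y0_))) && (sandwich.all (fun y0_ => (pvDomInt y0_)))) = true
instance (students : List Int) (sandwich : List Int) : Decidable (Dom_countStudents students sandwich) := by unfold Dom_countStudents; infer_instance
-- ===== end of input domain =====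

-- B replaces A's queue simulation (rotate students to the back until the front matches
-- each sandwich) by a counter: tally preferences once, consume sandwiches in order,
-- stop at the first sandwich nobody left wants.  Objective: alternative algorithm.


-- ===== PORT A =====
-- the while loop of A: rotate the student queue; pop both fronts when they match;
-- stop when the front sandwich is no longer wanted by anyone in the queue
def pvLoopA (student : List Int) (sandwiches : List Int) : List Int :=
  match sandwiches with
  | [] => student
  | s :: stail =>
    match student with
    | [] => []          -- 's in student' is False on the empty queue: the while loop stops
    | a :: rest =>
      if hmem : s ∈ a :: rest then
        if ha : a = s then pvLoopA rest stail
        else pvLoopA (rest ++ [a]) (s :: stail)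
      else a :: rest
termination_by (sandwiches.length, student.idxOf (sandwiches.headD 0))
decreasing_by
  · exact Prod.Lex.left _ _ (by simp)
  · apply Prod.Lex.right
    simp only [List.headD_cons]
    have hs : s ∈ rest := by
      rcases List.mem_cons.mp hmem with h | h
      · exact absurd h (fun hh => ha hh.symm)
      · exact h
    rw [List.idxOf_cons_ne _ ha, List.idxOf_append_of_mem hs]
    omega

def countStudents (students : List Int) (sandwich : List Int) : Int :=
  ((pvLoopA students sandwich).length : Int)

-- ===== PORT B =====
-- Source B's for-loop over the sandwiches with a Counter and a remaining count
def pvLoopB (counts : PySem.Dict Int Int) (remaining : Int) (sw : List Int) : Int :=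
  match sw with
  | [] => remaining
  | s :: rest =>
    if counts.getD s 0 = 0 then remaining
    else pvLoopB (counts.modify s 0 (· - 1)) (remaining - 1) rest

def countStudents_alt (students : List Int) (sandwich : List Int) : Int :=
  pvLoopB (PySem.Dict.counter students) (students.length : Int) sandwich

-- ===== PRECONDITION & SPEC =====
def Spec_countStudents (students : List Int) (sandwich : List Int) (out : Int) : Prop := out = countStudents_alt students sandwich
instance (students : List Int) (sandwich : List Int) (out : Int) : Decidable (Spec_countStudents students sandwich out) := by unfold Spec_countStudents; infer_instance

-- ===== CLAIM (what is proved, stated in full; the proofs are below) =====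
def Claim_equal_countStudents : Prop := ∀ (students : List Int) (sandwich : List Int), Dom_countStudents students sandwich → Spec_countStudents students sandwich (countStudents students sandwich)

-- ===== LEMMAS AND PROOFS =====

-- abstract specification of both loops, as a function of the MULTISET of students
def pvSpecLoop (m : Multiset Int) : List Int → ℕ
  | [] => Multiset.card m
  | s :: rest => if s ∈ m then pvSpecLoop (m.erase s) rest else Multiset.card m

theorem pvLoopA_spec (student sandwiches : List Int) :
    (pvLoopA student sandwiches).length = pvSpecLoop (↑student) sandwiches := by
  induction student, sandwiches using pvLoopA.induct with
  | case1 student => simp [pvLoopA, pvSpecLoop]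
  | case2 s stail => simp [pvLoopA, pvSpecLoop]
  | case3 stail s rest hmem ih =>
    rw [pvLoopA]
    simp only [dif_pos hmem, dite_true]
    rw [ih, pvSpecLoop]
    have hm : s ∈ (↑(s :: rest) : Multiset Int) := by simp [hmem]
    rw [if_pos hm, ← Multiset.cons_coe, Multiset.erase_cons_head]
  | case4 s stail a rest hmem ha ih =>
    rw [pvLoopA]
    simp only [dif_pos hmem, dif_neg ha]
    rw [ih]
    have hperm : (↑(rest ++ [a]) : Multiset Int) = (↑(a :: rest) : Multiset Int) := by
      rw [Multiset.coe_eq_coe]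
      exact List.perm_append_singleton a rest
    rw [hperm]
  | case5 s stail a rest hmem =>
    rw [pvLoopA]
    simp only [dif_neg hmem]
    rw [pvSpecLoop]
    have hm : s ∉ (↑(a :: rest) : Multiset Int) := by simpa using hmem
    rw [if_neg hm]
    simp

theorem pvLoopB_spec (sw : List Int) (m : Multiset Int) (counts : PySem.Dict Int Int)
    (hc : ∀ x, counts.getD x 0 = (m.count x : Int)) :
    pvLoopB counts (Multiset.card m : Int) sw = (pvSpecLoop m sw : Int) := by
  induction sw generalizing m counts with
  | nil => simp [pvLoopB, pvSpecLoop]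
  | cons s rest ih =>
    simp only [pvLoopB, pvSpecLoop, hc]
    by_cases hs : s ∈ m
    · have hcount : (m.count s : Int) ≠ 0 := by
        have := Multiset.count_pos.mpr hs; omega
      rw [if_neg hcount, if_pos hs]
      have hc' : ∀ x, (counts.modify s 0 (· - 1)).getD x 0 = ((m.erase s).count x : Int) := by
        intro x
        by_cases hxs : x = s
        · subst hxs
          rw [PySem.Dict.getD_modify_self, hc, Multiset.count_erase_self]
          have := Multiset.count_pos.mpr hs; omega
        · rw [PySem.Dict.getD_modify_of_ne _ _ _ hxs, hc,
            Multiset.count_erase_of_ne hxs]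
      have hcard : (Multiset.card m : Int) - 1 = (Multiset.card (m.erase s) : Int) := by
        have h1 := Multiset.card_erase_of_mem hs
        have h2 : 0 < Multiset.card m := Multiset.card_pos_iff_exists_mem.mpr ⟨s, hs⟩
        simp only [Nat.pred_eq_sub_one] at h1
        omega
      rw [hcard, ih (m.erase s) _ hc']
    · have hcount : (m.count s : Int) = 0 := by
        simpa using Multiset.count_eq_zero.mpr hs
      rw [if_pos hcount, if_neg hs]

-- ===== VERDICT (by name: the statement is the Claim_ definition above) =====
theorem countStudents_spec : Claim_equal_countStudents := by
  intro students sandwich _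
  unfold Spec_countStudents countStudents countStudents_alt
  have hc : ∀ x, (PySem.Dict.counter students).getD x 0 = ((↑students : Multiset Int).count x : Int) := by
    intro x
    rw [PySem.Dict.getD_counter]
    simp [Multiset.coe_count]
  have hcard : (students.length : Int) = (Multiset.card (↑students : Multiset Int) : Int) := by
    simp
  rw [pvLoopA_spec, hcard, pvLoopB_spec sandwich _ _ hc]
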